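-- pv_equiv track=rewrite | github.com/GenryEden/kpolyakovName | 2858.py | f
-- ===== SOURCE A (Python) =====
-- from math import isqrt
--
-- def f(x):
-- 	cnt = 0
-- 	s = 0
-- 	if isqrt(x)**2 == x:
-- 		cnt -= 1
-- 		s -= isqrt(x)
-- 	for i in range(2, isqrt(x)+1):
-- 		if x % i == 0:
-- 			cnt += 2
-- 			s += i + x//i
-- 	return cnt, s
-- ===== SOURCE B (Python) =====
-- def f(x):
--     # count and sum of divisors of x strictly between 1 and x, computed from the
--     # prime factorization: d = prod(e_i + 1), sigma = prod of geometric sums.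
--     n = x
--     i = 2
--     d = 1
--     s = 1
--     while i * i <= n:
--         if n % i == 0:
--             e = 0
--             while n % i == 0:
--                 n //= i
--                 e += 1
--             d *= e + 1
--             s *= (i ** (e + 1) - 1) // (i - 1)
--         i += 1
--     if n > 1:
--         d *= 2
--         s *= n + 1
--     return (d - 2, s - 1 - x)
-- ===== Notes on version B (the rewrite author's own statement) =====
-- stated objective: alternative
-- what changed: B factorizes x by trial division (dividing out each prime found, so the bound i*i<=n shrinks) and computes the divisor count and divisor sum from the prime exponents via product formulas, instead of A's scan of all i up to isqrt(x) accumulating divisor pairs with a perfect-square pre-correction.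
-- outside the precondition, e.g. on f(-4): A raises ValueError, B returns (-1, 4)
import Mathlib
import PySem

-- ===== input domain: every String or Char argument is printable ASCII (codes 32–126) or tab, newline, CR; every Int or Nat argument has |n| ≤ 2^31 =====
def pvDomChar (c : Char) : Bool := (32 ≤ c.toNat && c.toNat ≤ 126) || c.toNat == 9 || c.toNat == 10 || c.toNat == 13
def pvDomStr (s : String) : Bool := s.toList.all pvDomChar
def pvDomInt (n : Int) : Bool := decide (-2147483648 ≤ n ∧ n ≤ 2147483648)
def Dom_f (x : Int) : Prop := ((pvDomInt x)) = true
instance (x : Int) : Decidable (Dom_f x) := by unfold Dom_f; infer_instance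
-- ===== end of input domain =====

-- B computes the divisor count and divisor sum from the prime factorization obtained by
-- trial division (dividing each prime out), instead of A's scan of every i up to isqrt(x).

-- math.isqrt, exact for 0 ≤ x (Python raises ValueError on negative x; Pre_f excludes that)
def pyIsqrt (x : Int) : Int := ((Int.toNat x).sqrt : Int)

-- ===== PORT A =====
def f (x : Int) : Int × Int :=
  let cnt : Int := 0
  let s : Int := 0
  let (cnt, s) := if pyIsqrt x ^ 2 = x then (cnt - 1, s - pyIsqrt x) else (cnt, s)
  (PySem.List.pyRange 2 (pyIsqrt x + 1) 1).foldl
    (fun st i =>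
      if PySem.Int.mod x i = 0 then (st.1 + 2, st.2 + (i + PySem.Int.floordiv x i)) else st)
    (cnt, s)

-- ===== PORT B =====
-- inner `while n % i == 0: n //= i; e += 1`; returns the final n and the exponent e.
-- The conjuncts `1 ≤ m ∧ 2 ≤ i` only make the recursion total; they hold throughout any
-- run started from Pre_f (x ≥ 1, i ≥ 2), where the guard is exactly Python's `n % i == 0`.
def bTrim (i m : Int) : Int × Int :=
  if h : 1 ≤ m ∧ 2 ≤ i ∧ PySem.Int.mod m i = 0 then
    let r := bTrim i (PySem.Int.floordiv m i)
    (r.1, r.2 + 1)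
  else (m, 0)
termination_by m.toNat
decreasing_by
  obtain ⟨hm, hi, -⟩ := h
  have h1 : PySem.Int.floordiv m i = m / i := PySem.Int.floordiv_eq_ediv_of_pos (by omega)
  have h3 : 0 ≤ m / i := Int.ediv_nonneg (by omega) (by omega)
  have h4 : m / i * i ≤ m := Int.ediv_mul_le m (by omega)
  have h5 : 2 * (m / i) ≤ m / i * i := by nlinarith
  rw [h1]; omega

-- fst of bTrim never grows; needed for bLoop's termination
theorem bTrim_fst_le (i m : Int) : (bTrim i m).1 ≤ m := by
  fun_induction bTrim i m with
  | case1 m h r ih =>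
    obtain ⟨hm, hi, -⟩ := h
    have h1 : PySem.Int.floordiv m i = m / i := PySem.Int.floordiv_eq_ediv_of_pos (by omega)
    have h3 : 0 ≤ m / i := Int.ediv_nonneg (by omega) (by omega)
    have h4 : m / i * i ≤ m := Int.ediv_mul_le m (by omega)
    have h5 : 2 * (m / i) ≤ m / i * i := by nlinarith
    show (bTrim i (PySem.Int.floordiv m i)).1 ≤ m
    rw [h1] at ih ⊢
    exact le_trans ih (by omega)
  | case2 m h => simp

-- outer `while i * i <= n:` of B; returns (n, d, s). The conjunct `2 ≤ i` only makes the
-- recursion total (i starts at 2 and only grows); the exponent `(e+1).toNat` is exact since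
-- bTrim's exponent is never negative.
def bLoop (n i d s : Int) : Int × Int × Int :=
  if h : i * i ≤ n ∧ 2 ≤ i then
    if PySem.Int.mod n i = 0 then
      let r := bTrim i n
      bLoop r.1 (i + 1) (d * (r.2 + 1))
        (s * PySem.Int.floordiv (i ^ (r.2 + 1).toNat - 1) (i - 1))
    else bLoop n (i + 1) d s
  else (n, d, s)
termination_by (n + 2 - i).toNat
decreasing_by
  · obtain ⟨hn, hi⟩ := h
    have h1 : (bTrim i n).1 ≤ n := bTrim_fst_le i n
    have h2 : i ≤ i * i := by nlinarith
    omega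
  · obtain ⟨hn, hi⟩ := h
    have h2 : i ≤ i * i := by nlinarith
    omega

def f_alt (x : Int) : Int × Int :=
  let r := bLoop x 2 1 1
  let (d, s) := if r.1 > 1 then (r.2.1 * 2, r.2.2 * (r.1 + 1)) else (r.2.1, r.2.2)
  (d - 2, s - 1 - x)

-- ===== PRECONDITION & SPEC =====
-- Pre_f excludes negative x, on which math.isqrt (hence A) raises ValueError.
def Pre_f (x : Int) : Prop := 0 ≤ x
instance (x : Int) : Decidable (Pre_f x) := by unfold Pre_f; infer_instance
def pvWitness_f : Int := 12

def Spec_f (x : Int) (out : Int × Int) : Prop := out = f_alt x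
instance (x : Int) (out : Int × Int) : Decidable (Spec_f x out) := by unfold Spec_f; infer_instance

-- ===== CLAIM (what is proved, stated in full; the proofs are below) =====
def Claim_equal_f : Prop := ∀ (x : Int), Dom_f x → Pre_f x → Spec_f x (f x)

-- ===== LEMMAS AND PROOFS =====

-- divisor count and divisor sum of a natural number, as integers (proof-only)
def DD (n : ℕ) : Int := (n.divisors.card : Int)
def SS (n : ℕ) : Int := ((∑ d ∈ n.divisors, d : ℕ) : Int)

-- the post-loop step of B (proof-only name for the `if n > 1` adjustment)
def bFinish (r : Int × Int × Int) : Int × Int :=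
  if r.1 > 1 then (r.2.1 * 2, r.2.2 * (r.1 + 1)) else (r.2.1, r.2.2)

-- ===== B side =====

theorem bTrim_spec (i m : Int) (hi : 2 ≤ i) (hm : 1 ≤ m) :
    ∃ (e : ℕ) (m' : Int), bTrim i m = (m', (e : Int)) ∧ m = i ^ e * m' ∧ ¬ i ∣ m' ∧ 1 ≤ m' := by
  fun_induction bTrim i m with
  | case1 m h r ih =>
    obtain ⟨hm', hi', hmod⟩ := h
    have hdvd : i ∣ m := (PySem.Int.mod_eq_zero_iff_dvd m i).mp hmod
    have hfd : PySem.Int.floordiv m i = m / i := PySem.Int.floordiv_eq_ediv_of_pos (by omega)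
    obtain ⟨k, hk⟩ := hdvd
    have hne : i ≠ 0 := by omega
    have hdiv : m / i = k := by rw [hk, Int.mul_ediv_cancel_left k hne]
    have hk1 : 1 ≤ k := by nlinarith
    rw [hfd, hdiv] at ih
    obtain ⟨e, m', heq, hfac, hnd, hm1⟩ := ih hk1
    refine ⟨e + 1, m', ?_, ?_, hnd, hm1⟩
    · show (r.1, r.2 + 1) = (m', ((e + 1 : ℕ) : Int))
      have hr : r = (m', (e : Int)) := by
        rw [show r = bTrim i (PySem.Int.floordiv m i) from rfl, hfd, hdiv, heq]
      rw [hr]; push_cast; ring_nf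
    · rw [hk, hfac]; ring
  | case2 m h =>
    push Not at h
    have hmod : PySem.Int.mod m i ≠ 0 := h hm hi
    refine ⟨0, m, by norm_num, by ring, ?_, hm⟩
    intro hdvd
    exact hmod ((PySem.Int.mod_eq_zero_iff_dvd m i).mpr hdvd)


theorem bLoop_term (n i d s : Int) (hn : 1 ≤ n) (hi : 2 ≤ i) (hlt : n < i * i)
    (hp : ∀ p : ℕ, p.Prime → (p : Int) ∣ n → i ≤ (p : Int)) :
    bFinish (bLoop n i d s) = (d * DD n.toNat, s * SS n.toNat) := by
  have hguard : ¬ (i * i ≤ n ∧ 2 ≤ i) := by intro ⟨h1, _⟩; omega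
  rw [bLoop, dif_neg hguard]
  rcases eq_or_lt_of_le hn with h1 | h2
  · -- n = 1
    have : n = 1 := h1.symm
    subst this
    simp [bFinish, DD, SS, Nat.divisors_one]
  · -- 2 ≤ n : n is prime
    have hn2 : 2 ≤ n := h2
    have hNn : ((n.toNat : ℕ) : Int) = n := by omega
    have hprime : n.toNat.Prime := by
      rw [Nat.prime_def_le_sqrt]
      refine ⟨by omega, ?_⟩
      intro m hm2 hmsqrt hmdvd
      have hmm : m * m ≤ n.toNat := Nat.le_sqrt.mp hmsqrt
      have hq := Nat.minFac_prime (show m ≠ 1 by omega)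
      have hqdvd : m.minFac ∣ n.toNat := (Nat.minFac_dvd m).trans hmdvd
      have hqint : ((m.minFac : ℕ) : Int) ∣ n := hNn ▸ Int.natCast_dvd_natCast.mpr hqdvd
      have hge := hp m.minFac hq hqint
      have hle : m.minFac ≤ m := Nat.minFac_le (by omega)
      have hmmI : (m : Int) * m ≤ n := by
        calc (m : Int) * m = ((m * m : ℕ) : Int) := by push_cast; ring
          _ ≤ ((n.toNat : ℕ) : Int) := by exact_mod_cast hmm
          _ = n := hNn
      have hleI : ((m.minFac : ℕ) : Int) ≤ (m : Int) := by exact_mod_cast hle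
      nlinarith
    have hne1 : n.toNat ≠ 1 := by omega
    have hDD : DD n.toNat = 2 := by
      rw [DD, hprime.divisors]
      rw [show ({1, n.toNat} : Finset ℕ).card = 2 from Finset.card_pair (Ne.symm hne1)]
      norm_num
    have hSS : SS n.toNat = 1 + n := by
      rw [SS, hprime.divisors]
      rw [Finset.sum_insert (by simp [Ne.symm hne1]), Finset.sum_singleton]
      push_cast [hNn]
      ring
    have hgt : (1 : Int) < n := by omega
    simp only [bFinish, if_pos (show n > 1 from hgt), hDD, hSS]
    exact Prod.ext rfl (by ring)

theorem DD_pow (p e : ℕ) (hp : p.Prime) : ((p ^ e).divisors).card = e + 1 := by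
  rw [Finset.card_eq_sum_ones, Nat.sum_divisors_prime_pow hp, Finset.sum_const, Finset.card_range]
  simp

theorem SS_pow (p e : ℕ) (hp : p.Prime) :
    (∑ d ∈ (p ^ e).divisors, d) = ∑ k ∈ Finset.range (e + 1), p ^ k :=
  Nat.sum_divisors_prime_pow hp

theorem geom_floordiv (i : Int) (e : ℕ) (hi : 2 ≤ i) :
    PySem.Int.floordiv (i ^ (e + 1) - 1) (i - 1) = ∑ k ∈ Finset.range (e + 1), i ^ k := by
  rw [PySem.Int.floordiv_eq_ediv_of_pos (by omega), ← geom_sum_mul i (e + 1),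
    Int.mul_ediv_cancel _ (by omega)]

theorem bLoop_go : ∀ (N : ℕ) (n i d s : Int), (n + 2 - i).toNat ≤ N → 1 ≤ n → 2 ≤ i →
    (∀ p : ℕ, p.Prime → (p : Int) ∣ n → i ≤ (p : Int)) →
    bFinish (bLoop n i d s) = (d * DD n.toNat, s * SS n.toNat) := by
  intro N
  induction N with
  | zero =>
    intro n i d s hN hn hi hp
    have hlt : n < i * i := by
      have hge : n + 2 ≤ i := by omega
      nlinarith
    exact bLoop_term n i d s hn hi hlt hp
  | succ N ih =>
    intro n i d s hN hn hi hp
    by_cases hguard : i * i ≤ n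
    · rw [bLoop, dif_pos ⟨hguard, hi⟩]
      by_cases hmod : PySem.Int.mod n i = 0
      · rw [if_pos hmod]
        have hidvd : i ∣ n := (PySem.Int.mod_eq_zero_iff_dvd n i).mp hmod
        obtain ⟨e, m', heq, hfac, hnd, hm1⟩ := bTrim_spec i n hi hn
        have he1 : 1 ≤ e := by
          rcases Nat.eq_zero_or_pos e with h0 | h
          · exfalso; rw [h0, pow_zero, one_mul] at hfac; exact hnd (hfac ▸ hidvd)
          · exact h
        -- i is prime: any prime factor of i divides n, hence is ≥ i, hence = i
        have hiN : ((i.toNat : ℕ) : Int) = i := by omega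
        have hIp : i.toNat.Prime := by
          have hne1 : i.toNat ≠ 1 := by omega
          have hq := Nat.minFac_prime hne1
          have hqd : i.toNat.minFac ∣ i.toNat := Nat.minFac_dvd _
          have hqdi : ((i.toNat.minFac : ℕ) : Int) ∣ i := hiN ▸ Int.natCast_dvd_natCast.mpr hqd
          have hge := hp _ hq (hqdi.trans hidvd)
          have hle : i.toNat.minFac ≤ i.toNat := Nat.minFac_le (by omega)
          have : i.toNat.minFac = i.toNat := by omega
          exact this ▸ hq
        have hie : (2 : Int) ≤ i ^ e := le_trans hi (le_self_pow₀ (by omega) (by omega))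
        have hm'n : m' ≤ n := by nlinarith
        have hp' : ∀ p : ℕ, p.Prime → (p : Int) ∣ m' → i + 1 ≤ (p : Int) := by
          intro p hpp hpd
          have hpn : (p : Int) ∣ n := hpd.trans ⟨i ^ e, by rw [hfac]; ring⟩
          have hge := hp p hpp hpn
          rcases eq_or_lt_of_le hge with hEq | hlt'
          · exfalso; exact hnd (hEq ▸ hpd)
          · omega
        have hto : ((e : Int) + 1).toNat = e + 1 := by omega
        simp only [heq, hto]
        rw [ih m' (i + 1) (d * ((e : Int) + 1))
            (s * PySem.Int.floordiv (i ^ (e + 1) - 1) (i - 1)) (by omega) hm1 (by omega) hp']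
        -- split n.toNat = i.toNat ^ e * m'.toNat and use multiplicativity
        have hfacN : n.toNat = i.toNat ^ e * m'.toNat := by
          have : ((i.toNat ^ e * m'.toNat : ℕ) : Int) = ((n.toNat : ℕ) : Int) := by
            push_cast [hiN]
            rw [Int.toNat_of_nonneg (show (0 : Int) ≤ m' by omega),
              Int.toNat_of_nonneg (show (0 : Int) ≤ n by omega)]
            exact hfac.symm
          exact (Nat.cast_injective this).symm
        have hndN : ¬ i.toNat ∣ m'.toNat := by
          intro hdd
          apply hnd
          have := Int.natCast_dvd_natCast.mpr hdd
          rwa [hiN, Int.toNat_of_nonneg (by omega)] at this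
        have hcop : (i.toNat ^ e).Coprime m'.toNat := (hIp.coprime_iff_not_dvd.mpr hndN).pow_left e
        have hDD : DD n.toNat = ((e : Int) + 1) * DD m'.toNat := by
          rw [DD, DD, hfacN, hcop.card_divisors_mul, DD_pow _ _ hIp]
          push_cast
          ring
        have hSS : SS n.toNat = (∑ k ∈ Finset.range (e + 1), i ^ k) * SS m'.toNat := by
          rw [SS, SS, hfacN, hcop.sum_divisors_mul, SS_pow _ _ hIp]
          push_cast [hiN]
          ring
        rw [geom_floordiv i e hi, hDD, hSS]
        exact Prod.ext (by ring) (by ring)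
      · rw [if_neg hmod]
        have hp' : ∀ p : ℕ, p.Prime → (p : Int) ∣ n → i + 1 ≤ (p : Int) := by
          intro p hpp hpd
          have hge := hp p hpp hpd
          rcases eq_or_lt_of_le hge with hEq | hlt'
          · exfalso
            exact hmod ((PySem.Int.mod_eq_zero_iff_dvd n i).mpr (hEq ▸ hpd))
          · omega
        exact ih n (i + 1) d s (by omega) hn (by omega) hp'
    · exact bLoop_term n i d s hn hi (by omega) hp

theorem bLoop_spec (n i d s : Int) (hn : 1 ≤ n) (hi : 2 ≤ i)
    (hp : ∀ p : ℕ, p.Prime → (p : Int) ∣ n → i ≤ (p : Int)) :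
    bFinish (bLoop n i d s) = (d * DD n.toNat, s * SS n.toNat) :=
  bLoop_go ((n + 2 - i).toNat) n i d s (le_refl _) hn hi hp


theorem f_alt_formula (x : Int) (hx : 1 ≤ x) :
    f_alt x = (DD x.toNat - 2, SS x.toNat - 1 - x) := by
  have hp0 : ∀ p : ℕ, p.Prime → (p : Int) ∣ x → (2 : Int) ≤ (p : Int) := fun p hp _ => by
    exact_mod_cast hp.two_le
  have h := bLoop_spec x 2 1 1 hx (le_refl 2) hp0
  rw [f_alt]
  rcases hr : bLoop x 2 1 1 with ⟨n', d', s'⟩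
  rw [hr, bFinish] at h
  simp only at h ⊢
  rw [Prod.mk.injEq] at h
  split_ifs at h ⊢ with h1
  · obtain ⟨h2, h3⟩ := h
    rw [Prod.mk.injEq]
    constructor <;> linarith
  · obtain ⟨h2, h3⟩ := h
    rw [Prod.mk.injEq]
    constructor <;> linarith


-- ===== A side =====

theorem foldA_aux (n : ℕ) (a : ℕ) (init : Int × Int) : ∀ (m : ℕ),
    (PySem.List.pyRange (a : Int) ((a + m : ℕ) : Int) 1).foldl
      (fun st i =>
        if PySem.Int.mod (n : Int) i = 0 then (st.1 + 2, st.2 + (i + PySem.Int.floordiv (n : Int) i))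
        else st) init
    = (init.1 + ∑ i ∈ Finset.Ico a (a + m), (if i ∣ n then (2 : Int) else 0),
       init.2 + ∑ i ∈ Finset.Ico a (a + m), (if i ∣ n then ((i : Int) + ((n / i : ℕ) : Int)) else 0)) := by
  intro m
  induction m with
  | zero =>
    rw [PySem.List.pyRange_one_eq_nil (by omega)]
    simp
  | succ m ih =>
    have hsplit : PySem.List.pyRange (a : Int) ((a + (m + 1) : ℕ) : Int) 1
        = PySem.List.pyRange (a : Int) ((a + m : ℕ) : Int) 1 ++ [((a + m : ℕ) : Int)] := by
      have h1 : ((a + (m + 1) : ℕ) : Int) = ((a + m : ℕ) : Int) + 1 := by push_cast; ring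
      rw [h1, PySem.List.pyRange_one_succ_right (by push_cast; omega)]
    rw [hsplit, List.foldl_append, ih]
    simp only [List.foldl_cons, List.foldl_nil]
    have hmod : PySem.Int.mod (n : Int) ((a + m : ℕ) : Int) = ((n % (a + m) : ℕ) : Int) :=
      PySem.Int.mod_natCast n (a + m)
    have hfd : PySem.Int.floordiv (n : Int) ((a + m : ℕ) : Int) = ((n / (a + m) : ℕ) : Int) :=
      PySem.Int.floordiv_natCast n (a + m)
    have hIco1 : ∑ i ∈ Finset.Ico a (a + (m + 1)), (if i ∣ n then (2 : Int) else 0)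
        = ∑ i ∈ Finset.Ico a (a + m), (if i ∣ n then (2 : Int) else 0)
          + (if (a + m) ∣ n then (2 : Int) else 0) := by
      rw [show a + (m + 1) = (a + m) + 1 by ring, Finset.sum_Ico_succ_top (by omega)]
    have hIco2 : ∑ i ∈ Finset.Ico a (a + (m + 1)), (if i ∣ n then ((i : Int) + ((n / i : ℕ) : Int)) else 0)
        = ∑ i ∈ Finset.Ico a (a + m), (if i ∣ n then ((i : Int) + ((n / i : ℕ) : Int)) else 0)
          + (if (a + m) ∣ n then (((a + m : ℕ) : Int) + ((n / (a + m) : ℕ) : Int)) else 0) := by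
      rw [show a + (m + 1) = (a + m) + 1 by ring, Finset.sum_Ico_succ_top (by omega)]
    rw [hIco1, hIco2, hmod, hfd]
    have hcond : ((((n % (a + m) : ℕ)) : Int) = 0) ↔ (a + m) ∣ n := by
      rw [Nat.cast_eq_zero]
      exact Nat.dvd_iff_mod_eq_zero.symm
    simp only [hcond]
    by_cases hdvd : (a + m) ∣ n
    · rw [if_pos hdvd, if_pos hdvd, if_pos hdvd]
      exact Prod.ext (by simp; ring) (by simp; ring)
    · rw [if_neg hdvd, if_neg hdvd, if_neg hdvd]
      exact Prod.ext (by simp) (by simp)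

theorem foldA (n a m : ℕ) (init : Int × Int) :
    (PySem.List.pyRange (a : Int) ((a + m : ℕ) : Int) 1).foldl
      (fun st i =>
        if PySem.Int.mod (n : Int) i = 0 then (st.1 + 2, st.2 + (i + PySem.Int.floordiv (n : Int) i))
        else st) init
    = (init.1 + ∑ i ∈ Finset.Ico a (a + m), (if i ∣ n then (2 : Int) else 0),
       init.2 + ∑ i ∈ Finset.Ico a (a + m), (if i ∣ n then ((i : Int) + ((n / i : ℕ) : Int)) else 0)) := foldA_aux n a init m

-- the √-pairing of divisors: d ↦ n / d matches divisors ≤ √n with divisors > √n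
theorem divisors_pairing (n : ℕ) (hn : 1 ≤ n) :
    n.divisors.card + (if n.sqrt * n.sqrt = n then 1 else 0)
      = 2 * (n.divisors.filter (fun d => d ≤ n.sqrt)).card
    ∧ (∑ d ∈ n.divisors, d) + (if n.sqrt * n.sqrt = n then n.sqrt else 0)
      = (∑ d ∈ n.divisors.filter (fun d => d ≤ n.sqrt), d)
        + (∑ d ∈ n.divisors.filter (fun d => d ≤ n.sqrt), n / d) := by
  have hn0 : n ≠ 0 := by omega
  set r := n.sqrt with hr
  have hr1 : 1 ≤ r := Nat.sqrt_pos.mpr (by omega)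
  set small := n.divisors.filter (fun d => d ≤ r) with hsmall
  set large := n.divisors.filter (fun d => ¬ d ≤ r) with hlarge
  set small' := small.filter (fun d => d * d ≠ n) with hsmall'
  have hmem_small : ∀ d, d ∈ small ↔ d ∣ n ∧ d ≤ r := by
    intro d; simp [hsmall, Nat.mem_divisors, hn0]
  have hmem_large : ∀ d, d ∈ large ↔ d ∣ n ∧ r < d := by
    intro d; simp [hlarge, Nat.mem_divisors, hn0]
  have hmem_small' : ∀ d, d ∈ small' ↔ (d ∣ n ∧ d ≤ r) ∧ d * d ≠ n := by
    intro d; simp [hsmall', hmem_small d, Finset.mem_filter]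
  -- facts about the map d ↦ n / d
  have hpos : ∀ d, d ∣ n → 0 < d := fun d hd => Nat.pos_of_dvd_of_pos hd (by omega)
  have hmaps1 : ∀ d ∈ large, n / d ∈ small' := by
    intro d hd
    rw [hmem_large] at hd
    obtain ⟨hdvd, hrd⟩ := hd
    have hd0 : 0 < d := hpos d hdvd
    have hmul : n / d * d = n := Nat.div_mul_cancel hdvd
    have hnd : n < d * d := by
      have := Nat.sqrt_lt'.mp (by omega : n.sqrt < d)
      nlinarith [this]
    have hq0 : 0 < n / d := hpos _ (Nat.div_dvd_of_dvd hdvd)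
    have hqd : n / d < d := by nlinarith
    rw [hmem_small']
    refine ⟨⟨Nat.div_dvd_of_dvd hdvd, ?_⟩, ?_⟩
    · rw [hr, Nat.le_sqrt]; nlinarith
    · nlinarith
  have hmaps2 : ∀ q ∈ small', n / q ∈ large := by
    intro q hq
    rw [hmem_small'] at hq
    obtain ⟨⟨hdvd, hqr⟩, hne⟩ := hq
    have hq0 : 0 < q := hpos q hdvd
    have hmul : n / q * q = n := Nat.div_mul_cancel hdvd
    have hqq : q * q ≤ n := Nat.le_sqrt.mp hqr
    have hqlt : q < n / q := by nlinarith [Nat.lt_of_le_of_ne hqq hne]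
    rw [hmem_large]
    refine ⟨Nat.div_dvd_of_dvd hdvd, ?_⟩
    have : n < (n / q) * (n / q) := by nlinarith
    have h2 := Nat.sqrt_lt'.mpr (by nlinarith : n < (n / q) ^ 2)
    omega
  have hinv1 : ∀ d ∈ large, n / (n / d) = d := by
    intro d hd; rw [hmem_large] at hd; exact Nat.div_div_self hd.1 hn0
  have hinv2 : ∀ q ∈ small', n / (n / q) = q := by
    intro q hq; rw [hmem_small'] at hq; exact Nat.div_div_self hq.1.1 hn0
  have hcard : large.card = small'.card :=
    Finset.card_bij' (fun d _ => n / d) (fun q _ => n / q) hmaps1 hmaps2 hinv1 hinv2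
  have hsum : ∑ d ∈ large, d = ∑ q ∈ small', n / q :=
    Finset.sum_bij' (fun d _ => n / d) (fun q _ => n / q) hmaps1 hmaps2 hinv1 hinv2
      (fun d hd => (hinv1 d hd).symm)
  have hcards : small.card + large.card = n.divisors.card :=
    Finset.card_filter_add_card_filter_not _
  have hsums : (∑ d ∈ small, d) + (∑ d ∈ large, d) = ∑ d ∈ n.divisors, d :=
    Finset.sum_filter_add_sum_filter_not _ _ _
  by_cases hsq : r * r = n
  · have hrmem : r ∈ small := (hmem_small r).mpr ⟨⟨r, hsq.symm⟩, le_refl r⟩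
    have hsmall'_eq : small' = small.erase r := by
      ext d
      rw [hmem_small', Finset.mem_erase, hmem_small]
      constructor
      · rintro ⟨⟨hdvd, hdr⟩, hne⟩
        refine ⟨?_, hdvd, hdr⟩
        rintro rfl; exact hne hsq
      · rintro ⟨hne, hdvd, hdr⟩
        refine ⟨⟨hdvd, hdr⟩, ?_⟩
        intro heq
        exact hne (Nat.mul_self_inj.mp (heq.trans hsq.symm))
    have hc1 : small'.card + 1 = small.card := by
      rw [hsmall'_eq]; exact Finset.card_erase_add_one hrmem
    have hs1 : (∑ q ∈ small', n / q) + n / r = ∑ q ∈ small, n / q := by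
      rw [hsmall'_eq]; exact Finset.sum_erase_add small _ hrmem
    have hnr : n / r = r := by rw [← hsq, Nat.mul_div_cancel_left r (by omega)]
    rw [if_pos hsq, if_pos hsq]
    omega
  · have hsmall'_eq : small' = small := by
      rw [hsmall']
      apply Finset.filter_true_of_mem
      intro d hd heq
      apply hsq
      have hdr : n.sqrt = d := by
        rw [← heq, show d * d = d ^ 2 from (sq d).symm, Nat.sqrt_eq']
      rw [hr, hdr]
      exact heq
    rw [if_neg hsq, if_neg hsq]
    have hc1 : small'.card = small.card := by rw [hsmall'_eq]
    have hs1 : (∑ q ∈ small', n / q) = ∑ q ∈ small, n / q := by rw [hsmall'_eq]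
    omega


theorem sum_Ico_dvd (n : ℕ) (hn : 1 ≤ n) (g : ℕ → Int) :
    ∑ i ∈ Finset.Ico 2 (n.sqrt + 1), (if i ∣ n then g i else 0)
      = ∑ d ∈ (n.divisors.filter (fun d => d ≤ n.sqrt)).erase 1, g d := by
  rw [← Finset.sum_filter]
  apply Finset.sum_congr ?_ (fun _ _ => rfl)
  ext d
  simp only [Finset.mem_filter, Finset.mem_Ico, Nat.mem_divisors, Finset.mem_erase]
  constructor
  · rintro ⟨⟨h2, hlt⟩, hdvd⟩
    exact ⟨by omega, ⟨⟨hdvd, by omega⟩, by omega⟩⟩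
  · rintro ⟨hne, ⟨⟨hdvd, hn0⟩, hle⟩⟩
    have hpos : 0 < d := Nat.pos_of_dvd_of_pos hdvd (by omega)
    exact ⟨⟨by omega, by omega⟩, hdvd⟩


theorem f_char (x : Int) :
    f x = (PySem.List.pyRange 2 (pyIsqrt x + 1) 1).foldl
      (fun st i =>
        if PySem.Int.mod x i = 0 then (st.1 + 2, st.2 + (i + PySem.Int.floordiv x i)) else st)
      (if pyIsqrt x ^ 2 = x then (0 - 1, 0 - pyIsqrt x) else (0, 0)) := rfl

theorem f_formula (n : ℕ) (hn : 1 ≤ n) :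
    f (n : Int) = (DD n - 2, SS n - 1 - (n : Int)) := by
  have hn0 : n ≠ 0 := by omega
  have hr1 : 1 ≤ n.sqrt := Nat.sqrt_pos.mpr (by omega)
  have hiq : pyIsqrt (n : Int) = ((n.sqrt : ℕ) : Int) := by
    unfold pyIsqrt; rw [Int.toNat_natCast]
  have hsq_iff : (pyIsqrt (n : Int) ^ 2 = (n : Int)) ↔ (n.sqrt * n.sqrt = n) := by
    rw [hiq, show (((n.sqrt : ℕ) : Int)) ^ 2 = ((n.sqrt * n.sqrt : ℕ) : Int) by push_cast; ring]
    exact Int.natCast_inj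
  have hbound : pyIsqrt (n : Int) + 1 = ((2 + (n.sqrt - 1) : ℕ) : Int) := by
    rw [hiq]; omega
  have hIco : Finset.Ico 2 (2 + (n.sqrt - 1)) = Finset.Ico 2 (n.sqrt + 1) := by
    congr 1; omega
  -- the divisor half below √n, and the two sums over it
  set small := n.divisors.filter (fun d => d ≤ n.sqrt) with hsmall
  have h1mem : (1 : ℕ) ∈ small := by
    rw [hsmall, Finset.mem_filter, Nat.mem_divisors]
    exact ⟨⟨one_dvd n, hn0⟩, hr1⟩
  have hcl : ((small.erase 1).card) + 1 = small.card := Finset.card_erase_add_one h1mem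
  have hsum2 : (∑ d ∈ small.erase 1, ((d : Int) + ((n / d : ℕ) : Int)))
      + ((1 : Int) + ((n / 1 : ℕ) : Int)) = ∑ d ∈ small, ((d : Int) + ((n / d : ℕ) : Int)) :=
    Finset.sum_erase_add small _ h1mem
  have hTsum : ∑ d ∈ small, ((d : Int) + ((n / d : ℕ) : Int))
      = ((∑ d ∈ small, d : ℕ) : Int) + ((∑ d ∈ small, n / d : ℕ) : Int) := by
    push_cast [Finset.sum_add_distrib]
    ring
  have hCsum : ∑ d ∈ small.erase 1, (2 : Int) = ((small.erase 1).card : Int) * 2 := by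
    rw [Finset.sum_const, nsmul_eq_mul]
  obtain ⟨hpair1, hpair2⟩ := divisors_pairing n hn
  rw [← hsmall] at hpair1 hpair2
  have hfold := foldA n 2 (n.sqrt - 1)
    (if pyIsqrt (n : Int) ^ 2 = (n : Int) then ((0 : Int) - 1, 0 - pyIsqrt (n : Int)) else (0, 0))
  rw [show (((2 : ℕ)) : Int) = (2 : Int) by norm_num, ← hbound, hIco] at hfold
  rw [f_char, hfold, sum_Ico_dvd n hn, sum_Ico_dvd n hn, ← hsmall]
  have hd1 : (n / 1 : ℕ) = n := Nat.div_one n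
  rw [Prod.mk.injEq]
  by_cases hsq : n.sqrt * n.sqrt = n
  · rw [if_pos hsq] at hpair1
    rw [if_pos hsq] at hpair2
    rw [if_pos (hsq_iff.mpr hsq)]
    simp only [hiq]
    constructor
    · rw [hCsum, DD]
      omega
    · rw [SS]
      omega
  · rw [if_neg hsq] at hpair1
    rw [if_neg hsq] at hpair2
    rw [if_neg (fun h => hsq (hsq_iff.mp h))]
    constructor
    · rw [hCsum, DD]
      omega
    · rw [SS]
      omega


-- ===== VERDICT (by name: the statement is the Claim_ definition above) =====
theorem f_spec : Claim_equal_f := by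
  intro x _ hpre
  show f x = f_alt x
  rcases lt_or_ge x 1 with hx | hx
  · have hx0 : x = 0 := by unfold Pre_f at hpre; omega
    subst hx0
    rw [f_alt, bLoop]
    norm_num
    rw [f]
    norm_num [pyIsqrt, PySem.List.pyRange_one_eq_nil]
  · have hxt : x = ((x.toNat : ℕ) : Int) := by omega
    have hn : 1 ≤ x.toNat := by omega
    rw [f_alt_formula x hx]
    calc f x = f ((x.toNat : ℕ) : Int) := by rw [← hxt]
      _ = (DD x.toNat - 2, SS x.toNat - 1 - ((x.toNat : ℕ) : Int)) := f_formula x.toNat hn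
      _ = (DD x.toNat - 2, SS x.toNat - 1 - x) := by rw [← hxt]
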